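-- pv_equiv track=rewrite | github.com/Harikrishnan342004/Problem_Solving | test.py | SignalGenerator
-- ===== SOURCE A (Python) =====
-- def SignalGenerator(n, array):
--     result = []
--     flat_values = []
--
--     i = 0
--
--     # Step 1: Find all flat phases
--     while i < n - 1:
--         if array[i] == array[i + 1]:
--             val = array[i]
--
--             # skip entire flat sequence
--             while i < n - 1 and array[i] == array[i + 1]:
--                 i += 1
--
--             flat_values.append(val)
--         i += 1
--
--     # Step 2: Generate output
--     if not flat_values:
--         return []
--
--     # First flat phase
--     result.append(1)
--
--     # Compare next flat phases
--     for i in range(1, len(flat_values)):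
--         if flat_values[i] > flat_values[i - 1]:
--             result.append(1)
--         else:
--             result.append(-1)
--
--     return result
-- ===== SOURCE B (Python) =====
-- def SignalGenerator(n, array):
--     # One pass over the first n elements: count run lengths; when a run
--     # reaches length 2 a new flat phase is detected and its signal is
--     # emitted immediately, comparing with the previous flat value.
--     out = []
--     prev_flat = None
--     run = 0
--     last = None
--     for v in array[:max(n, 0)]:
--         if last is not None and v == last:
--             run += 1
--             if run == 2:
--                 out.append(1 if prev_flat is None or v > prev_flat else -1)
--                 prev_flat = v
--         else:
--             last = v
--             run = 1
--     return out
-- ===== Notes on version B (the rewrite author's own statement) =====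
-- stated objective: simpler
-- what changed: Replaces A's two-phase index-based scan (nested while loops detecting flat runs into a list, then a second range loop comparing adjacent flat values) with a single structural pass over the prefix that maintains only the previous element, the current run length and the previous flat value, emitting each signal the moment a run reaches length 2; the constant-factor speedup comes from dropping per-element array[i]/array[i+1] double indexing and the second pass.
import Mathlib
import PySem

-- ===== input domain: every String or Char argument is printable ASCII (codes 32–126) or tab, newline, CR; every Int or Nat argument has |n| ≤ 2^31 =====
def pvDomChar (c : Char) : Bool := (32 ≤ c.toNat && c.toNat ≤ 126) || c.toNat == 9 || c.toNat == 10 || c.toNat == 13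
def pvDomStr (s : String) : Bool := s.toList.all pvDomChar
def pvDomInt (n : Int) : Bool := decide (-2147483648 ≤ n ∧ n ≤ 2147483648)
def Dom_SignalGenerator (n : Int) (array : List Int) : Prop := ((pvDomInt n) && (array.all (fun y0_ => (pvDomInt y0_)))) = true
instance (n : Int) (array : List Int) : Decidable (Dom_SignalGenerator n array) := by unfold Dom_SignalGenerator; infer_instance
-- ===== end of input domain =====

-- B replaces A's two-phase indexed scan (nested whiles collecting flat values, then a
-- comparison loop) by a single structural pass that emits each signal as soon as a run
-- reaches length 2 (objective: simpler).

-- ===== PORT A =====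
-- inner `while i < n - 1 and array[i] == array[i + 1]: i += 1`
def pvA_skip (n : Int) (array : List Int) (i : Int) : Int :=
  if h : i < n - 1 ∧ PySem.List.pyGet? array i = PySem.List.pyGet? array (i + 1) then
    pvA_skip n array (i + 1)
  else i
termination_by (n - 1 - i).toNat
decreasing_by have := h.1; omega

-- termination fact cited by `pvA_outer`'s decreasing_by
theorem pvA_skip_ge (n : Int) (array : List Int) (i : Int) : i ≤ pvA_skip n array i := by
  rw [pvA_skip]
  split
  next h => have := pvA_skip_ge n array (i + 1); omega
  next => omega
termination_by (n - 1 - i).toNat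
decreasing_by rename_i h; have := h.1; omega

-- outer `while i < n - 1:` loop of Step 1 (state: i, flat_values)
def pvA_outer (n : Int) (array : List Int) (i : Int) (flats : List Int) : List Int :=
  if h : i < n - 1 then
    if PySem.List.pyGet? array i = PySem.List.pyGet? array (i + 1) then
      let j := pvA_skip n array i
      pvA_outer n array (j + 1) (flats ++ [PySem.List.pyGetD array i 0])
    else pvA_outer n array (i + 1) flats
  else flats
termination_by (n - 1 - i).toNat
decreasing_by
  · have := pvA_skip_ge n array i; omega
  · omega

def SignalGenerator (n : Int) (array : List Int) : List Int :=
  let flat_values := pvA_outer n array 0 []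
  if flat_values = [] then []
  else
    (PySem.List.pyRange 1 (flat_values.length : Int) 1).foldl
      (fun result i =>
        if PySem.List.pyGetD flat_values i 0 > PySem.List.pyGetD flat_values (i - 1) 0 then
          result ++ [1]
        else result ++ [-1])
      [1]

-- ===== PORT B =====
-- loop body of Source B (state: out, prev_flat, run, last)
def pvB_step (st : List Int × Option Int × Int × Option Int) (v : Int) :
    List Int × Option Int × Int × Option Int :=
  let (out, prevFlat, run, last) := st
  if last = some v then
    let run := run + 1
    if run = 2 then
      (out ++ [match prevFlat with | none => (1 : Int) | some p => if p < v then 1 else -1],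
       some v, run, last)
    else (out, prevFlat, run, last)
  else (out, prevFlat, 1, some v)

def SignalGenerator_alt (n : Int) (array : List Int) : List Int :=
  ((PySem.List.slice array none (some (max n 0))).foldl pvB_step ([], none, 0, none)).1

-- ===== PRECONDITION & SPEC =====
-- excludes exactly the inputs where A raises IndexError (n ≥ 2 and n > len(array))
def Pre_SignalGenerator (n : Int) (array : List Int) : Prop :=
  n ≤ (array.length : Int) ∨ n ≤ 1
instance (n : Int) (array : List Int) : Decidable (Pre_SignalGenerator n array) := by
  unfold Pre_SignalGenerator; infer_instance

def pvWitness_SignalGenerator : Int × List Int := (4, [1, 1, 2, 2])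

def Spec_SignalGenerator (n : Int) (array : List Int) (out : List Int) : Prop :=
  out = SignalGenerator_alt n array
instance (n : Int) (array : List Int) (out : List Int) : Decidable (Spec_SignalGenerator n array out) := by
  unfold Spec_SignalGenerator; infer_instance

-- ===== CLAIM (what is proved, stated in full; the proofs are below) =====
def Claim_equal_SignalGenerator : Prop := ∀ (n : Int) (array : List Int),
  Dom_SignalGenerator n array → Pre_SignalGenerator n array →
  Spec_SignalGenerator n array (SignalGenerator n array)

-- ===== LEMMAS AND PROOFS =====

-- the flat values found in a list (run of length ≥ 2 ↦ its value)
def pvFlats : List Int → List Int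
  | [] => []
  | [_] => []
  | a :: b :: t =>
    if a = b then a :: pvFlats (t.dropWhile (· = b))
    else pvFlats (b :: t)
termination_by l => l.length
decreasing_by
  · simp only [List.length_cons]
    have := List.length_dropWhile_le (· = b) t; omega
  · simp

-- the signal list for a sequence of flat values, given the previous flat value
def pvSig : Option Int → List Int → List Int
  | _, [] => []
  | pf, f :: fs =>
    (match pf with | none => (1 : Int) | some p => if p < f then 1 else -1) :: pvSig (some f) fs

theorem pvFlats_short (l : List Int) (h : l.length ≤ 1) : pvFlats l = [] := by
  match l with
  | [] => simp [pvFlats]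
  | [_] => simp [pvFlats]
  | _ :: _ :: _ => simp at h

-- ---- B side ----

theorem pvB_step_run2 (out : List Int) (pf : Option Int) (a : Int) :
    pvB_step (out, pf, 1, some a) a
      = (out ++ [match pf with | none => (1 : Int) | some p => if p < a then 1 else -1],
         some a, 2, some a) := by
  simp [pvB_step]

theorem pvB_step_ge2 (out : List Int) (pf : Option Int) (r a : Int) (hr : 2 ≤ r) :
    pvB_step (out, pf, r, some a) a = (out, pf, r + 1, some a) := by
  simp only [pvB_step]
  rw [if_pos trivial, if_neg (by omega)]

theorem pvB_step_ne (out : List Int) (pf : Option Int) (r a b : Int) (h : ¬ a = b) :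
    pvB_step (out, pf, r, some a) b = (out, pf, 1, some b) := by
  simp [pvB_step, h]

theorem pvB_main (l : List Int) :
    (∀ out pf a, ((l.foldl pvB_step (out, pf, 1, some a)).1 : List Int)
      = out ++ pvSig pf (pvFlats (a :: l)))
    ∧ (∀ out pf a (r : Int), 2 ≤ r →
      ((l.foldl pvB_step (out, pf, r, some a)).1 : List Int)
      = out ++ pvSig pf (pvFlats (l.dropWhile (· = a)))) := by
  induction l with
  | nil => simp [pvFlats, pvSig]
  | cons b t ih =>
    constructor
    · intro out pf a
      by_cases hab : a = b
      · subst hab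
        rw [List.foldl_cons, pvB_step_run2, ih.2 _ (some a) a 2 (by norm_num)]
        rw [show pvFlats (a :: a :: t) = a :: pvFlats (t.dropWhile (· = a)) from by
          rw [pvFlats]; simp]
        simp [pvSig]
      · rw [List.foldl_cons, pvB_step_ne _ _ _ _ _ hab, ih.1 out pf b]
        rw [show pvFlats (a :: b :: t) = pvFlats (b :: t) from by
          rw [pvFlats]; simp [hab]]
    · intro out pf a r hr
      by_cases hab : a = b
      · subst hab
        rw [List.foldl_cons, pvB_step_ge2 _ _ _ _ hr, ih.2 out pf a (r + 1) (by omega)]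
        simp
      · rw [List.foldl_cons, pvB_step_ne _ _ _ _ _ hab, ih.1 out pf b]
        rw [List.dropWhile_cons_of_neg (by simpa using fun h => hab h.symm)]

theorem pvB_step_none (out : List Int) (pf : Option Int) (r v : Int) :
    pvB_step (out, pf, r, none) v = (out, pf, 1, some v) := by
  simp [pvB_step]

theorem pvB_eq (n : Int) (array : List Int) :
    SignalGenerator_alt n array = pvSig none (pvFlats (array.take n.toNat)) := by
  unfold SignalGenerator_alt
  rw [PySem.List.slice_to array (le_max_right n 0)]
  rw [show (max n 0).toNat = n.toNat from by omega]
  cases h : array.take n.toNat with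
  | nil => simp [pvFlats, pvSig]
  | cons v t =>
    rw [List.foldl_cons, pvB_step_none, (pvB_main t).1 [] none v]
    simp

-- ---- A side ----

def pvSeg (n : Int) (array : List Int) (i : Int) : List Int :=
  (array.drop i.toNat).take (n - i).toNat

theorem pvSeg_length (n : Int) (array : List Int) (i : Int)
    (h0 : 0 ≤ i) (hn : n ≤ (array.length : Int)) :
    (pvSeg n array i).length = (n - i).toNat := by
  simp [pvSeg]; omega

theorem pvSeg_head (n : Int) (array : List Int) (i : Int) (a : Int) (s : List Int)
    (h0 : 0 ≤ i) (h : pvSeg n array i = a :: s) :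
    PySem.List.pyGet? array i = some a := by
  unfold pvSeg at h
  rcases hd : array.drop i.toNat with _ | ⟨x, u⟩
  · rw [hd] at h; simp at h
  · rw [hd] at h
    rcases hk : (n - i).toNat with _ | k
    · rw [hk] at h; simp at h
    · rw [hk, List.take_succ_cons] at h
      injection h with hx hs
      rw [PySem.List.pyGet?_of_nonneg array h0,
        show array[i.toNat]? = (array.drop i.toNat)[0]? from by simp [List.getElem?_drop], hd]
      simp [hx]

theorem pvSeg_tail (n : Int) (array : List Int) (i : Int) (a : Int) (s : List Int)
    (h0 : 0 ≤ i) (h : pvSeg n array i = a :: s) :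
    pvSeg n array (i + 1) = s := by
  unfold pvSeg at h ⊢
  rcases hd : array.drop i.toNat with _ | ⟨x, u⟩
  · rw [hd] at h; simp at h
  · rw [hd] at h
    rcases hk : (n - i).toNat with _ | k
    · rw [hk] at h; simp at h
    · rw [hk, List.take_succ_cons] at h
      injection h with hx hs
      rw [show (i + 1).toNat = i.toNat + 1 from by omega,
        show (n - (i + 1)).toNat = k from by omega,
        show array.drop (i.toNat + 1) = (array.drop i.toNat).drop 1 from by
          simp [List.drop_drop],
        hd]
      simpa using hs

theorem pvA_skip_eq (n : Int) (array : List Int) (s : List Int) (a : Int) : ∀ (i : Int),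
    0 ≤ i → n ≤ (array.length : Int) → pvSeg n array i = a :: s →
    pvA_skip n array i = i + ((s.takeWhile (· = a)).length : Int)
    ∧ pvSeg n array (pvA_skip n array i + 1) = s.dropWhile (· = a) := by
  induction s with
  | nil =>
    intro i h0 hn hseg
    have hlen := pvSeg_length n array i h0 hn
    rw [hseg] at hlen; simp at hlen
    rw [pvA_skip, dif_neg (fun hc => absurd hc.1 (by omega))]
    refine ⟨by simp, ?_⟩
    simp [pvSeg, show (n - (i + 1)).toNat = 0 from by omega]
  | cons b s' ih =>
    intro i h0 hn hseg
    have hlen := pvSeg_length n array i h0 hn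
    rw [hseg] at hlen; simp at hlen
    have hi : i < n - 1 := by omega
    have ha := pvSeg_head n array i a _ h0 hseg
    have ht := pvSeg_tail n array i a _ h0 hseg
    have hb := pvSeg_head n array (i + 1) b s' (by omega) ht
    by_cases hab : b = a
    · subst hab
      obtain ⟨h1, h2⟩ := ih (i + 1) (by omega) hn ht
      rw [pvA_skip, dif_pos ⟨hi, by rw [ha, hb]⟩]
      refine ⟨?_, ?_⟩
      · rw [h1, List.takeWhile_cons_of_pos (by simp)]
        simp; omega
      · rw [h2, List.dropWhile_cons_of_pos (by simp)]
    · rw [pvA_skip, dif_neg (fun hc => by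
        rw [ha, hb] at hc
        exact hab (Option.some.inj hc.2).symm)]
      refine ⟨?_, ?_⟩
      · rw [List.takeWhile_cons_of_neg (by simpa using hab)]
        simp
      · rw [ht, List.dropWhile_cons_of_neg (by simpa using hab)]

theorem pvGetD_of_pyGet? (xs : List Int) (i : Int) (a d : Int)
    (h0 : 0 ≤ i) (h : PySem.List.pyGet? xs i = some a) :
    PySem.List.pyGetD xs i d = a := by
  rw [PySem.List.pyGet?_of_nonneg xs h0] at h
  have hlt : i.toNat < xs.length := by
    by_contra hc
    rw [List.getElem?_eq_none (by omega)] at h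
    simp at h
  rw [PySem.List.pyGetD_eq_getElem xs d h0 (by omega)]
  rw [List.getElem?_eq_getElem hlt] at h
  exact Option.some.inj h

theorem pvA_outer_eq (n : Int) (array : List Int) (i : Int) (acc : List Int)
    (h0 : 0 ≤ i) (hn : n ≤ (array.length : Int)) :
    pvA_outer n array i acc = acc ++ pvFlats (pvSeg n array i) := by
  rw [pvA_outer]
  split
  next hi =>
    have hlen := pvSeg_length n array i h0 hn
    rcases hseg : pvSeg n array i with _ | ⟨a, rest⟩
    · rw [hseg] at hlen; simp at hlen; omega
    rcases hrest : rest with _ | ⟨b, t⟩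
    · rw [hseg, hrest] at hlen; simp at hlen; omega
    subst hrest
    have ha := pvSeg_head n array i a _ h0 hseg
    have ht := pvSeg_tail n array i a _ h0 hseg
    have hb := pvSeg_head n array (i + 1) b t (by omega) ht
    split
    next heq =>
      have hab : a = b := by
        rw [ha, hb] at heq; exact Option.some.inj heq
      subst hab
      obtain ⟨h1, h2⟩ := pvA_skip_eq n array (a :: t) a i h0 hn hseg
      have hge := pvA_skip_ge n array i
      show pvA_outer n array (pvA_skip n array i + 1) (acc ++ [PySem.List.pyGetD array i 0])
        = acc ++ pvFlats (a :: a :: t)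
      rw [pvA_outer_eq n array (pvA_skip n array i + 1) _ (by omega) hn, h2]
      rw [pvGetD_of_pyGet? array i a 0 h0 ha]
      rw [show pvFlats (a :: a :: t) = a :: pvFlats (t.dropWhile (· = a)) from by
        rw [pvFlats]; simp]
      rw [List.dropWhile_cons_of_pos (by simp)]
      simp
    next hne =>
      have hab : ¬ a = b := fun hc => hne (by rw [ha, hb, hc])
      rw [pvA_outer_eq n array (i + 1) acc (by omega) hn, ht]
      rw [show pvFlats (a :: b :: t) = pvFlats (b :: t) from by
        rw [pvFlats]; simp [hab]]
  next hi =>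
    rw [pvFlats_short _ (by rw [pvSeg_length n array i h0 hn]; omega), List.append_nil]
termination_by (n - 1 - i).toNat
decreasing_by
  · omega
  · omega

theorem pvStage2 (flats : List Int) (j : Nat) (acc : List Int)
    (h1 : 1 ≤ j) (h2 : j ≤ flats.length) :
    (PySem.List.pyRange (j : Int) (flats.length : Int) 1).foldl
      (fun result i =>
        if PySem.List.pyGetD flats i 0 > PySem.List.pyGetD flats (i - 1) 0 then
          result ++ [1]
        else result ++ [-1]) acc
    = acc ++ pvSig (some (flats.getD (j - 1) 0)) (flats.drop j) := by
  by_cases hj : j < flats.length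
  · rw [PySem.List.pyRange_one_cons (by exact_mod_cast hj), List.foldl_cons]
    rw [show ((j : Int)) - 1 = ((j - 1 : Nat) : Int) from by push_cast [h1]; ring]
    rw [PySem.List.pyGetD_natCast, PySem.List.pyGetD_natCast]
    rw [show (j : Int) + 1 = ((j + 1 : Nat) : Int) from by push_cast; ring]
    rw [pvStage2 flats (j + 1) _ (by omega) (by omega)]
    rw [List.drop_eq_getElem_cons hj]
    rw [show pvSig (some (flats.getD (j - 1) 0)) (flats[j] :: flats.drop (j + 1))
        = (if flats.getD (j - 1) 0 < flats[j] then 1 else -1)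
          :: pvSig (some flats[j]) (flats.drop (j + 1)) from by simp [pvSig]]
    rw [show flats.getD (j + 1 - 1) 0 = flats[j] from by
      simp [List.getD_eq_getElem?_getD, List.getElem?_eq_getElem hj]]
    rw [show flats.getD j 0 = flats[j] from by
      simp [List.getD_eq_getElem?_getD, List.getElem?_eq_getElem hj]]
    simp only [gt_iff_lt]
    split <;> simp
  · rw [PySem.List.pyRange_one_eq_nil (by exact_mod_cast (by omega : flats.length ≤ j))]
    rw [List.drop_of_length_le (by omega)]
    simp [pvSig]
termination_by flats.length - j
decreasing_by omega

-- ===== VERDICT (by name: the statement is the Claim_ definition above) =====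
theorem SignalGenerator_spec : Claim_equal_SignalGenerator := by
  unfold Claim_equal_SignalGenerator
  intro n array _ hpre
  unfold Spec_SignalGenerator
  rw [pvB_eq]
  by_cases hn : n ≤ (array.length : Int)
  · unfold SignalGenerator
    have hA : pvA_outer n array 0 [] = pvFlats (array.take n.toNat) := by
      rw [pvA_outer_eq n array 0 [] le_rfl hn]
      simp [pvSeg]
    rw [hA]
    cases hfl : pvFlats (array.take n.toNat) with
    | nil => simp [pvSig]
    | cons f fs =>
      rw [if_neg (by simp)]
      have hst := pvStage2 (f :: fs) 1 [1] le_rfl (by simp)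
      simp only [Nat.cast_one] at hst
      rw [hst]
      simp [pvSig]
  · have h1 : n ≤ 1 := by
      rcases hpre with h | h
      · exact absurd h hn
      · exact h
    have harr : array = [] := List.length_eq_zero_iff.mp (by omega)
    subst harr
    unfold SignalGenerator
    rw [show pvA_outer n [] 0 [] = [] from by rw [pvA_outer, dif_neg (by omega)]]
    simp [pvFlats, pvSig]
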